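-- pv_equiv track=rewrite | github.com/aidenp004/g_sheets_automation_v1 | src/sheets_client.py | _header_index_map
-- ===== SOURCE A (Python) =====
-- def _header_index_map(headers: list[str]) -> dict[str, int]:
--     """Build a 1-based column index map from stripped header names."""
--     index_map: dict[str, int] = {}
--     duplicates: list[str] = []
--
--     for col, raw_header in enumerate(headers, start=1):
--         header = raw_header.strip()
--         if not header:
--             continue
--         if header in index_map:
--             duplicates.append(header)
--             continue
--         index_map[header] = col
--
--     if duplicates:
--         dupes = ", ".join(sorted(set(duplicates)))
--         raise ValueError(f"Duplicate header names after trimming whitespace: {dupes}")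
--
--     return index_map
-- ===== SOURCE B (Python) =====
-- def _header_index_map(headers: list[str]) -> dict[str, int]:
--     """Build a 1-based column index map from stripped header names."""
--     grouped: dict[str, list[int]] = {}
--     for col, raw_header in enumerate(headers, start=1):
--         name = raw_header.strip()
--         if name:
--             grouped.setdefault(name, []).append(col)
--
--     dup_names = [name for name, cols in grouped.items() if len(cols) > 1]
--     if dup_names:
--         dupes = ", ".join(sorted(set(dup_names)))
--         raise ValueError(f"Duplicate header names after trimming whitespace: {dupes}")
--
--     return {name: cols[0] for name, cols in grouped.items()}
-- ===== Notes on version B (the rewrite author's own statement) =====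
-- stated objective: alternative
-- what changed: B builds a full name -> list-of-column-positions multimap in one pass, then derives the duplicate names by filtering groups with more than one position and the index map by taking each group's first position, instead of A's running first-seen dict plus a duplicates accumulator inside the loop.
import Mathlib
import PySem

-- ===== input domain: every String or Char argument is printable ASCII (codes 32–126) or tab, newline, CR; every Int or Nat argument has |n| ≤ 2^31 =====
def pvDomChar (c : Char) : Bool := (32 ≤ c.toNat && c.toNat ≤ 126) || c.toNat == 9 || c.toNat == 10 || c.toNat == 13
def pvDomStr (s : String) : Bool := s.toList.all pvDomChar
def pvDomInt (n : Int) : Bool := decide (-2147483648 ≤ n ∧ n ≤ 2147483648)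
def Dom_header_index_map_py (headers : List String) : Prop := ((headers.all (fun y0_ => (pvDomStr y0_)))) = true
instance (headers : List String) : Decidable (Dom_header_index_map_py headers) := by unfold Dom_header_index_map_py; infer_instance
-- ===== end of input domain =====

-- B replaces A's running first-seen dict + duplicates accumulator by a two-phase build
-- (position multimap, then filter/project); same return value wherever A returns.
-- Pre_ excludes inputs with duplicate stripped non-empty header names, on which the
-- Python A (and B) raise ValueError.

-- ===== PORT A =====
-- one loop step of A: state = (index_map, duplicates, col)
def headerStepA (st : PySem.Dict String Int × List String × Int) (raw : String) :
    PySem.Dict String Int × List String × Int :=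
  let h := PySem.Str.strip raw
  if h = "" then (st.1, st.2.1, st.2.2 + 1)
  else if st.1.contains h then (st.1, st.2.1 ++ [h], st.2.2 + 1)
  else (st.1.insert h st.2.2, st.2.1, st.2.2 + 1)

-- the 'if duplicates: raise ValueError(...)' path is excluded by Pre_; the port returns index_map
def header_index_map_py (headers : List String) : List (String × Int) :=
  (headers.foldl headerStepA (PySem.Dict.empty, [], 1)).1.items

-- ===== PORT B =====
-- one loop step of B: state = (grouped positions multimap, col); setdefault(..,[]).append(col)
def headerStepB (st : PySem.Dict String (List Int) × Int) (raw : String) :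
    PySem.Dict String (List Int) × Int :=
  let h := PySem.Str.strip raw
  if h = "" then (st.1, st.2 + 1)
  else (st.1.modify h [] (· ++ [st.2]), st.2 + 1)

-- the duplicate check ('if dup_names: raise') is excluded by Pre_; every group is nonempty,
-- so 'cols[0]' is ported as headD 0
def header_index_map_py_alt (headers : List String) : List (String × Int) :=
  let grouped := (headers.foldl headerStepB (PySem.Dict.empty, 1)).1
  grouped.items.map (fun p => (p.1, p.2.headD 0))

-- ===== PRECONDITION & SPEC =====
-- Pre_ excludes exactly the inputs on which Python A raises ValueError (some stripped
-- non-empty header name occurs twice); Python B raises there too.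
def Pre_header_index_map_py (headers : List String) : Prop :=
  ((headers.map (fun s => PySem.Str.strip s)).filter (fun s => s ≠ "")).Nodup

instance (headers : List String) : Decidable (Pre_header_index_map_py headers) := by
  unfold Pre_header_index_map_py; infer_instance

def pvWitness_header_index_map_py : List String := ["id", " Name ", "", "  ", "price\t"]

def Spec_header_index_map_py (headers : List String) (out : List (String × Int)) : Prop :=
  out = header_index_map_py_alt headers
instance (headers : List String) (out : List (String × Int)) : Decidable (Spec_header_index_map_py headers out) := by
  unfold Spec_header_index_map_py; infer_instance

-- ===== CLAIM (what is proved, stated in full; the proofs are below) =====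
def Claim_equal_header_index_map_py : Prop := ∀ (headers : List String), Dom_header_index_map_py headers → Pre_header_index_map_py headers → Spec_header_index_map_py headers (header_index_map_py headers)

-- ===== LEMMAS AND PROOFS =====

-- projection from B's grouped entries to A's index-map entries
def headerProj (p : String × List Int) : String × Int := (p.1, p.2.headD 0)

lemma contains_of_items_map (im : PySem.Dict String Int) (g : PySem.Dict String (List Int))
    (hitems : im.items = g.items.map headerProj) (k : String) :
    im.contains k = g.contains k := by
  simp [PySem.Dict.contains, hitems, List.any_map, Function.comp_def, headerProj]

-- loop invariant: A's index_map is the headerProj image of B's grouped multimap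
lemma header_loop (headers : List String) :
    ∀ (im : PySem.Dict String Int) (g : PySem.Dict String (List Int))
      (dups : List String) (col : Int),
      im.items = g.items.map headerProj →
      g.keys.Nodup →
      (∀ p ∈ g.items, p.2 ≠ []) →
      (headers.foldl headerStepA (im, dups, col)).1.items =
        ((headers.foldl headerStepB (g, col)).1.items.map headerProj) := by
  induction headers with
  | nil => intro im g dups col hitems _ _; simpa using hitems
  | cons raw rest ih =>
    intro im g dups col hitems hnd hne
    simp only [List.foldl_cons, headerStepA, headerStepB]
    by_cases hempty : PySem.Str.strip raw = ""
    · simp only [hempty, if_true]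
      exact ih im g dups (col + 1) hitems hnd hne
    · simp only [if_neg hempty]
      set h := PySem.Str.strip raw with hh
      have hcont := contains_of_items_map im g hitems h
      by_cases hc : g.contains h = true
      · -- duplicate occurrence: A leaves index_map alone, B appends col to h's group
        rw [hcont, if_pos hc]
        apply ih _ _ _ _ _ _ _
        · -- items of (g.modify h [] (· ++ [col])) project to im.items
          rw [PySem.Dict.modify, PySem.Dict.items_insert_of_contains g _ hc, hitems]
          rw [List.map_map]
          apply List.map_congr_left
          intro p hp
          by_cases hpk : p.1 = h
          · have hpm : (p.1, p.2) ∈ g.items := by simpa using hp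
            have hget : g.getD h [] = p.2 := by
              exact PySem.Dict.getD_of_mem_items g (hpk ▸ hpm) hnd []
            have hpne : p.2 ≠ [] := hne p hp
            simp only [Function.comp_apply, hpk, beq_self_eq_true, if_true, headerProj, hget]
            cases p2 : p.2 with
            | nil => exact absurd p2 hpne
            | cons a t => simp
          · simp [Function.comp, headerProj, hpk]
        · simpa [PySem.Dict.modify] using
            PySem.Dict.nodup_keys_insert g h (g.getD h [] ++ [col]) hnd
        · intro p hp
          rw [PySem.Dict.modify, PySem.Dict.items_insert_of_contains g _ hc] at hp
          rcases List.mem_map.mp hp with ⟨q, hq, hqe⟩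
          by_cases hqk : q.1 = h
          · have : p = (h, g.getD h [] ++ [col]) := by simpa [hqk] using hqe.symm
            simp [this]
          · have : p = q := by simpa [hqk] using hqe.symm
            exact this ▸ hne q hq
      · -- fresh name: A inserts (h, col), B starts the group [col]
        rw [hcont, if_neg hc]
        have hcf : g.contains h = false := by simpa using hc
        apply ih _ _ _ _ _ _ _
        · rw [PySem.Dict.modify, PySem.Dict.getD_of_not_contains g [] hcf,
              PySem.Dict.items_insert_of_not_contains g _ hcf,
              PySem.Dict.items_insert_of_not_contains]
          · simp [hitems, headerProj]
          · rw [contains_of_items_map im g hitems h]; exact hcf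
        · simpa [PySem.Dict.modify] using
            PySem.Dict.nodup_keys_insert g h (g.getD h [] ++ [col]) hnd
        · intro p hp
          rw [PySem.Dict.modify, PySem.Dict.getD_of_not_contains g [] hcf,
              PySem.Dict.items_insert_of_not_contains g _ hcf] at hp
          rcases List.mem_append.mp hp with hp | hp
          · exact hne p hp
          · simp at hp; simp [hp]

-- ===== VERDICT (by name: the statement is the Claim_ definition above) =====
theorem header_index_map_py_spec : Claim_equal_header_index_map_py := by
  intro headers _ _
  unfold Spec_header_index_map_py header_index_map_py header_index_map_py_alt
  have := header_loop headers PySem.Dict.empty PySem.Dict.empty [] 1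
    (by simp [PySem.Dict.empty]) (by simp [PySem.Dict.empty, PySem.Dict.keys])
    (by simp [PySem.Dict.empty])
  exact this
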